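-- pv_equiv track=rewrite | github.com/ottobonilla95/elevaite-test | python_apps/auth_api/app/core/password_utils.py | is_password_temporary
-- ===== SOURCE A (Python) =====
-- from typing import Tuple
--
-- def is_password_temporary(email: str, password: str) -> Tuple[bool, str]:
--     """
--     Check if the provided credentials are for a test account that should trigger password reset.
--     Also used to check if a password is temporary based on specific patterns.
--
--     Args:
--         email: User's email
--         password: User's password
--
--     Returns:
--         Tuple[bool, str]: (is_temporary, message)
--     """
--     # Check for test credentials that should trigger password reset flow
--     if email == "panagiotis.v@iopex.com" and password == "password123":
--         return True, "Test account detected. Redirecting to password reset flow."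
--
--     # This is a heuristic to detect temporary passwords from the forgot-password flow
--     if (
--         len(password) >= 16
--         and any(c.islower() for c in password)
--         and any(c.isupper() for c in password)
--         and any(c.isdigit() for c in password)
--         and any(c in "!@#$%^&*()_+-=[]{}|;:,.<>?" for c in password)
--     ):
--         return True, "Temporary password detected. Redirecting to password reset flow."
--
--     return False, ""
-- ===== SOURCE B (Python) =====
-- def is_password_temporary(email: str, password: str):
--     if email == "panagiotis.v@iopex.com" and password == "password123":
--         return True, "Test account detected. Redirecting to password reset flow."
--     has_lower = has_upper = has_digit = has_special = False
--     for c in password: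
--         if c.islower():
--             has_lower = True
--         if c.isupper():
--             has_upper = True
--         if c.isdigit():
--             has_digit = True
--         if c in "!@#$%^&*()_+-=[]{}|;:,.<>?":
--             has_special = True
--     if len(password) >= 16 and has_lower and has_upper and has_digit and has_special:
--         return True, "Temporary password detected. Redirecting to password reset flow."
--     return False, ""
-- ===== Notes on version B (the rewrite author's own statement) =====
-- stated objective: alternative
-- what changed: Replaces A's four separate any() scans over the password with a single pass that accumulates the four character-class flags, then tests length and flags once.
import Mathlib
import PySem

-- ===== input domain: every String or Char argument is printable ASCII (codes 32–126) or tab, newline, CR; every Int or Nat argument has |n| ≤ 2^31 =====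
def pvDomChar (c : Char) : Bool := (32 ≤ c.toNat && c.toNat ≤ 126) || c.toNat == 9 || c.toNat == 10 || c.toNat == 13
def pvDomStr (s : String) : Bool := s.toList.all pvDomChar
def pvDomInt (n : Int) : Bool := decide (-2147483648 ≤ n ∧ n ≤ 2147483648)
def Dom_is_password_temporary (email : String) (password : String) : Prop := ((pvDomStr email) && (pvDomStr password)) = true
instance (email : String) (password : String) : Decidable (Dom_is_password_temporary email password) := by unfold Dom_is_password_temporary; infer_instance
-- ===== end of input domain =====

-- B changes only the decomposition (one combined flag-accumulating pass instead of four any() scans); same values everywhere.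

-- ===== PORT A =====
-- Python str.islower()/isupper()/isdigit() restricted to one char, exact on the ASCII domain
def pvIsLower (c : Char) : Bool := 'a' ≤ c && c ≤ 'z'
def pvIsUpper (c : Char) : Bool := 'A' ≤ c && c ≤ 'Z'
def pvIsDigit (c : Char) : Bool := '0' ≤ c && c ≤ '9'
def pvSpecials : List Char := "!@#$%^&*()_+-=[]{}|;:,.<>?".toList
def pvIsSpecial (c : Char) : Bool := pvSpecials.contains c

def is_password_temporary (email : String) (password : String) : Bool × String :=
  if email = "panagiotis.v@iopex.com" && password = "password123" then
    (true, "Test account detected. Redirecting to password reset flow.")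
  else if password.toList.length ≥ 16
        && password.toList.any pvIsLower
        && password.toList.any pvIsUpper
        && password.toList.any pvIsDigit
        && password.toList.any pvIsSpecial then
    (true, "Temporary password detected. Redirecting to password reset flow.")
  else
    (false, "")

-- ===== PORT B =====
-- one pass accumulating the four flags (Source B's loop)
def pvFlags (l : List Char) : Bool × Bool × Bool × Bool :=
  l.foldl (fun (s : Bool × Bool × Bool × Bool) c =>
    (s.1 || pvIsLower c, s.2.1 || pvIsUpper c, s.2.2.1 || pvIsDigit c, s.2.2.2 || pvIsSpecial c))
    (false, false, false, false)

def is_password_temporary_alt (email : String) (password : String) : Bool × String :=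
  if email = "panagiotis.v@iopex.com" && password = "password123" then
    (true, "Test account detected. Redirecting to password reset flow.")
  else
    let f := pvFlags password.toList
    if password.toList.length ≥ 16 && f.1 && f.2.1 && f.2.2.1 && f.2.2.2 then
      (true, "Temporary password detected. Redirecting to password reset flow.")
    else
      (false, "")

-- ===== PRECONDITION & SPEC =====
def Spec_is_password_temporary (email : String) (password : String) (out : Bool × String) : Prop := out = is_password_temporary_alt email password
instance (email : String) (password : String) (out : Bool × String) : Decidable (Spec_is_password_temporary email password out) := by unfold Spec_is_password_temporary; infer_instance

-- ===== CLAIM (what is proved, stated in full; the proofs are below) =====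
def Claim_equal_is_password_temporary : Prop := ∀ (email : String) (password : String), Dom_is_password_temporary email password → Spec_is_password_temporary email password (is_password_temporary email password)

-- ===== LEMMAS AND PROOFS =====
theorem pvFlags_eq (l : List Char) (a b c d : Bool) :
    l.foldl (fun (s : Bool × Bool × Bool × Bool) ch =>
      (s.1 || pvIsLower ch, s.2.1 || pvIsUpper ch, s.2.2.1 || pvIsDigit ch, s.2.2.2 || pvIsSpecial ch))
      (a, b, c, d)
    = (a || l.any pvIsLower, b || l.any pvIsUpper, c || l.any pvIsDigit, d || l.any pvIsSpecial) := by
  induction l generalizing a b c d with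
  | nil => simp
  | cons x xs ih =>
    simp only [List.foldl_cons, List.any_cons, ih]
    simp [Bool.or_assoc]

theorem pvFlags_spec (l : List Char) :
    pvFlags l = (l.any pvIsLower, l.any pvIsUpper, l.any pvIsDigit, l.any pvIsSpecial) := by
  simpa using pvFlags_eq l false false false false

-- ===== VERDICT (by name: the statement is the Claim_ definition above) =====
theorem is_password_temporary_spec : Claim_equal_is_password_temporary := by
  intro email password _
  unfold Spec_is_password_temporary is_password_temporary is_password_temporary_alt
  simp only [pvFlags_spec]
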